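-- pv_equiv track=rewrite | github.com/ukoloff/orazaev | sgen/sgen/handlers.py | cxxClassHandler
-- ===== SOURCE A (Python) =====
-- def makeIndent(text, tabstop=4):
--     """(str, tabstop=4) -> str
--
--        add indentation for text.
--     """
--
--     result = ''
--     for line in text.splitlines():
--             result += ((' ' * tabstop + line) if line else '') + '\n'
--
--     return result
--
-- def cxxClassHandler(data, inside='', tabstop=4, typeMap={}):
--     """(str, inside='', tabstop=4, typeMap={}) -> str
--
--        >>> cxxClassHandler('TestClass')
--        '/*\\n    TODO: brief class description\\n*/\\nclass TestClass {\\n};'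
--        >>> cxxClassHandler('TTest', inside='TTest TTest() {\\n  printf("Constructor");\\n}', tabstop=2)
--        '/*\\n  TODO: brief class description\\n*/\\nclass TTest {\\n  TTest TTest() {\\n    printf("Constructor");\\n  }\\n};'
--     """
--
--     def modificatorsIndent(text):
--         result = ''
--         for line in text.splitlines():
--             if line.strip() in ['public:', 'private:', 'protected:']:
--                 result += line[tabstop:] + '\n'
--             else:
--                 result += line + '\n'
--
--         return result
--
--     comment = '/*\n' + ' ' * tabstop + 'TODO: brief class description\n*/\n'
--     body = 'class {0} '.format(data) + '{\n' + modificatorsIndent(makeIndent(inside, tabstop)) + '};'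
--     return comment + body
-- ===== SOURCE B (Python) =====
-- def cxxClassHandler(data, inside='', tabstop=4, typeMap={}):
--     """Single pass over inside.splitlines(): empty lines stay empty, access-specifier
--     lines stay as written, every other line gets tabstop spaces of indentation."""
--     indent = ' ' * tabstop
--     parts = []
--     for line in inside.splitlines():
--         if not line:
--             parts.append('\n')
--         elif line.strip() in ('public:', 'private:', 'protected:'):
--             parts.append(line + '\n')
--         else:
--             parts.append(indent + line + '\n')
--     return ('/*\n' + indent + 'TODO: brief class description\n*/\n'
--             + 'class ' + data + ' {\n' + ''.join(parts) + '};')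
-- ===== Notes on version B (the rewrite author's own statement) =====
-- stated objective: simpler
-- what changed: One pass over inside.splitlines() chooses each line's final form directly (empty line / access-specifier kept as written / indented) and joins the pieces, replacing A's two-pass scheme of indenting every line and then stripping the indentation back off access-specifier lines.
-- intended difference: On negative tabstop with an access-specifier line longer than -tabstop characters, A returns the skeleton with that line truncated to its last -tabstop characters (line[tabstop:] undoes an indentation that the empty indent string never added), while B keeps the specifier line intact, which is the intended un-indented line. — e.g. on cxxClassHandler("C", "public:", -1, []): A returns "/*\nTODO: brief class description\n*/\nclass C {\n:\n};", B returns "/*\nTODO: brief class description\n*/\nclass C {\npublic:\n};"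
import Mathlib
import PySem

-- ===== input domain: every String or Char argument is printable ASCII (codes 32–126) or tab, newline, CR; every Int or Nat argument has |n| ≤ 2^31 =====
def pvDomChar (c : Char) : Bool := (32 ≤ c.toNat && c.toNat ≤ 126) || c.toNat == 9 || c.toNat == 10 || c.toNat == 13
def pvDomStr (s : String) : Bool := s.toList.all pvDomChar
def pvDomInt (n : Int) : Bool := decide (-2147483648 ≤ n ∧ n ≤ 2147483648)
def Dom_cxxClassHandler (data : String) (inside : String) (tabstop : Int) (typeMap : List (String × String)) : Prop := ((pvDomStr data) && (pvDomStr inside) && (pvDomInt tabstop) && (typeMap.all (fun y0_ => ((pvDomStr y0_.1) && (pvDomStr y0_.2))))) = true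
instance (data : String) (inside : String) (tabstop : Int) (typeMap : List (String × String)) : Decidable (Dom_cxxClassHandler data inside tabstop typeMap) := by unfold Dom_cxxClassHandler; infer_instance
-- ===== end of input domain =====

-- B replaces A's indent-everything-then-strip-specifier-lines double pass by one pass that
-- chooses each line's final form directly (objective: simpler; equal return value outside D_).

-- ===== PORT A =====
-- the access-specifier list of modificatorsIndent
def pvSpecs : List (List Char) := ["public:".toList, "private:".toList, "protected:".toList]

-- makeIndent(text, tabstop)
def pvMakeIndent (text : List Char) (tabstop : Int) : List Char :=
  (PySem.Chars.splitlines text).foldl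
    (fun result line =>
      result ++ ((if line ≠ [] then List.replicate tabstop.toNat ' ' ++ line else []) ++ ['\n'])) []

-- modificatorsIndent(text) (a closure over tabstop in A)
def pvModificatorsIndent (text : List Char) (tabstop : Int) : List Char :=
  (PySem.Chars.splitlines text).foldl
    (fun result line =>
      if PySem.Chars.strip line ∈ pvSpecs then
        result ++ (PySem.List.slice line (some tabstop) none ++ ['\n'])
      else
        result ++ (line ++ ['\n'])) []

def cxxClassHandler (data : String) (inside : String) (tabstop : Int) (typeMap : List (String × String)) : String :=
  let comment : List Char :=
    "/*\n".toList ++ List.replicate tabstop.toNat ' ' ++ "TODO: brief class description\n*/\n".toList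
  let body : List Char :=
    "class ".toList ++ data.toList ++ " ".toList ++ "{\n".toList
      ++ pvModificatorsIndent (pvMakeIndent inside.toList tabstop) tabstop ++ "};".toList
  String.ofList (comment ++ body)

-- ===== PORT B =====
-- the piece B's loop appends for one source line (its three branches)
def pvAltPiece (indent : List Char) (line : List Char) : List Char :=
  if line = [] then ['\n']
  else if PySem.Chars.strip line ∈ pvSpecs then line ++ ['\n']
  else indent ++ line ++ ['\n']

def cxxClassHandler_alt (data : String) (inside : String) (tabstop : Int) (typeMap : List (String × String)) : String :=
  let indent : List Char := List.replicate tabstop.toNat ' '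
  let parts : List (List Char) := (PySem.Chars.splitlines inside.toList).map (pvAltPiece indent)
  String.ofList ("/*\n".toList ++ indent ++ "TODO: brief class description\n*/\n".toList
    ++ "class ".toList ++ data.toList ++ " {\n".toList ++ PySem.Chars.join [] parts ++ "};".toList)

-- ===== PRECONDITION & SPEC =====
-- On negative tabstop with an access-specifier line longer than -tabstop characters, A returns the
-- skeleton with that line truncated to its last -tabstop characters (line[tabstop:] undoes an
-- indentation that the empty indent string never added), while B keeps the specifier line intact,
-- which is the intended un-indented line.
def D_cxxClassHandler (data : String) (inside : String) (tabstop : Int) (typeMap : List (String × String)) : Prop :=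
  tabstop < 0 ∧ ∃ l ∈ PySem.Chars.splitlines inside.toList,
    PySem.Chars.strip l ∈ ["public:".toList, "private:".toList, "protected:".toList] ∧
    -tabstop < (l.length : Int)
instance (data : String) (inside : String) (tabstop : Int) (typeMap : List (String × String)) : Decidable (D_cxxClassHandler data inside tabstop typeMap) := by unfold D_cxxClassHandler; infer_instance

def Spec_cxxClassHandler (data : String) (inside : String) (tabstop : Int) (typeMap : List (String × String)) (out : String) : Prop := ¬ D_cxxClassHandler data inside tabstop typeMap → out = cxxClassHandler_alt data inside tabstop typeMap
instance (data : String) (inside : String) (tabstop : Int) (typeMap : List (String × String)) (out : String) : Decidable (Spec_cxxClassHandler data inside tabstop typeMap out) := by unfold Spec_cxxClassHandler; infer_instance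

def pvDiffWitness_cxxClassHandler : String × String × Int × (List (String × String)) :=
  ("C", "public:", -1, [])
def pvDiffWitnessOut_cxxClassHandler : String × String :=
  ("/*\nTODO: brief class description\n*/\nclass C {\n:\n};",
   "/*\nTODO: brief class description\n*/\nclass C {\npublic:\n};")

-- ===== CLAIM (what is proved, stated in full; the proofs are below) =====
def Claim_unchanged_cxxClassHandler : Prop := ∀ (data : String) (inside : String) (tabstop : Int) (typeMap : List (String × String)), Dom_cxxClassHandler data inside tabstop typeMap → Spec_cxxClassHandler data inside tabstop typeMap (cxxClassHandler data inside tabstop typeMap)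
def Claim_changed_cxxClassHandler : Prop := Dom_cxxClassHandler (pvDiffWitness_cxxClassHandler.1) (pvDiffWitness_cxxClassHandler.2.1) (pvDiffWitness_cxxClassHandler.2.2.1) (pvDiffWitness_cxxClassHandler.2.2.2) ∧ D_cxxClassHandler (pvDiffWitness_cxxClassHandler.1) (pvDiffWitness_cxxClassHandler.2.1) (pvDiffWitness_cxxClassHandler.2.2.1) (pvDiffWitness_cxxClassHandler.2.2.2) ∧ cxxClassHandler (pvDiffWitness_cxxClassHandler.1) (pvDiffWitness_cxxClassHandler.2.1) (pvDiffWitness_cxxClassHandler.2.2.1) (pvDiffWitness_cxxClassHandler.2.2.2) = pvDiffWitnessOut_cxxClassHandler.1 ∧ cxxClassHandler_alt (pvDiffWitness_cxxClassHandler.1) (pvDiffWitness_cxxClassHandler.2.1) (pvDiffWitness_cxxClassHandler.2.2.1) (pvDiffWitness_cxxClassHandler.2.2.2) = pvDiffWitnessOut_cxxClassHandler.2 ∧ pvDiffWitnessOut_cxxClassHandler.1 ≠ pvDiffWitnessOut_cxxClassHandler.2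
def Claim_exact_cxxClassHandler : Prop := ∀ (data : String) (inside : String) (tabstop : Int) (typeMap : List (String × String)), Dom_cxxClassHandler data inside tabstop typeMap → D_cxxClassHandler data inside tabstop typeMap → cxxClassHandler data inside tabstop typeMap ≠ cxxClassHandler_alt data inside tabstop typeMap

-- ===== LEMMAS AND PROOFS =====

-- A's per-line transformations, named for the proofs: the line after makeIndent, and after
-- modificatorsIndent
def pvIndLine (tabstop : Int) (l : List Char) : List Char :=
  if l ≠ [] then List.replicate tabstop.toNat ' ' ++ l else []

def pvModLine (tabstop : Int) (l : List Char) : List Char :=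
  if PySem.Chars.strip l ∈ pvSpecs then PySem.List.slice l (some tabstop) none ++ ['\n']
  else l ++ ['\n']

-- the line-break predicate splitlines uses (definitionally the `have isB` inside Chars.splitlines)
def pvIsB (c : Char) : Bool :=
  have n := c.toNat
  decide (n = 10) || decide (n = 13) || decide (n = 11) || decide (n = 12) || decide (n = 28) ||
    decide (n = 29) || decide (n = 30) || decide (n = 133) || decide (n = 8232) || decide (n = 8233)

lemma pv_splitlines_eq (s : List Char) :
    PySem.Chars.splitlines s = PySem.Chars.splitlines.go pvIsB s [] [] := rfl

lemma pv_go_cons (c : Char) (hc : pvIsB c = false) (s : List Char) (cur : List Char)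
    (acc : List (List Char)) :
    PySem.Chars.splitlines.go pvIsB (c :: s) cur acc
      = PySem.Chars.splitlines.go pvIsB s (c :: cur) acc := by
  have h13 : c ≠ '\r' := by rintro rfl; simp [pvIsB] at hc
  rw [PySem.Chars.splitlines.go.eq_def]
  split
  · simp_all
  · simp_all
  · simp_all

lemma pv_go_newline (s : List Char) (cur : List Char) (acc : List (List Char)) :
    PySem.Chars.splitlines.go pvIsB ('\n' :: s) cur acc
      = PySem.Chars.splitlines.go pvIsB s [] (cur.reverse :: acc) := by
  rw [PySem.Chars.splitlines.go.eq_def]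
  split
  · simp_all
  · simp_all
  · rename_i c' rest' hne' heq
    injection heq with h1 h2
    subst h1; subst h2
    rw [if_pos (by decide)]

lemma pv_go_run (l : List Char) (h : ∀ c ∈ l, pvIsB c = false) (rest : List Char)
    (cur : List Char) (acc : List (List Char)) :
    PySem.Chars.splitlines.go pvIsB (l ++ rest) cur acc
      = PySem.Chars.splitlines.go pvIsB rest (l.reverse ++ cur) acc := by
  induction l generalizing cur with
  | nil => simp
  | cons c t ih =>
      have hc : pvIsB c = false := h c (by simp)
      rw [List.cons_append, pv_go_cons c hc, ih (fun d hd => h d (by simp [hd]))]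
      simp

lemma pv_go_flatten (lines : List (List Char))
    (h : ∀ l ∈ lines, ∀ c ∈ l, pvIsB c = false) (acc : List (List Char)) :
    PySem.Chars.splitlines.go pvIsB ((lines.map (· ++ ['\n'])).flatten) [] acc
      = acc.reverse ++ lines := by
  induction lines generalizing acc with
  | nil => rw [PySem.Chars.splitlines.go.eq_def]; simp
  | cons l ls ih =>
      have hl : ∀ c ∈ l, pvIsB c = false := h l (by simp)
      have hls : ∀ m ∈ ls, ∀ c ∈ m, pvIsB c = false := fun m hm => h m (by simp [hm])
      rw [List.map_cons, List.flatten_cons, List.append_assoc, List.singleton_append,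
        pv_go_run l hl, pv_go_newline, ih hls]
      simp

-- lines delivered by splitlines contain no line-break character
lemma pv_acc_ext (cur : List Char) (acc : List (List Char))
    (hcur : ∀ c ∈ cur, pvIsB c = false) (hacc : ∀ l ∈ acc, ∀ c ∈ l, pvIsB c = false) :
    ∀ l ∈ cur.reverse :: acc, ∀ c ∈ l, pvIsB c = false := by
  intro l hl
  rcases List.mem_cons.mp hl with rfl | hl'
  · intro c hc; exact hcur c (List.mem_reverse.mp hc)
  · exact hacc l hl'

lemma pv_go_no_break (s : List Char) (cur : List Char) (acc : List (List Char))
    (hcur : ∀ c ∈ cur, pvIsB c = false) (hacc : ∀ l ∈ acc, ∀ c ∈ l, pvIsB c = false) :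
    ∀ l ∈ PySem.Chars.splitlines.go pvIsB s cur acc, ∀ c ∈ l, pvIsB c = false := by
  induction s, cur, acc using PySem.Chars.splitlines.go.induct pvIsB with
  | case1 cur acc hemp =>
      rw [PySem.Chars.splitlines.go.eq_def]
      simp only [hemp, if_true]
      intro l hl
      exact hacc l (by simpa using hl)
  | case2 cur acc hemp =>
      rw [PySem.Chars.splitlines.go.eq_def]
      dsimp only
      rw [if_neg hemp]
      intro l hl
      exact pv_acc_ext cur acc hcur hacc l (List.mem_reverse.mp hl)
  | case3 rest cur acc ih =>
      rw [PySem.Chars.splitlines.go.eq_def]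
      exact ih (by simp) (pv_acc_ext cur acc hcur hacc)
  | case4 c rest cur acc hne hb ih =>
      rw [PySem.Chars.splitlines.go.eq_def]
      split
      · simp_all
      · rename_i heq
        injection heq with h1 h2
        exact (hne _ h1 h2).elim
      · rename_i c' rest' hne' heq
        injection heq with h1 h2
        subst h1; subst h2
        rw [if_pos hb]
        exact ih (by simp) (pv_acc_ext _ _ hcur hacc)
  | case5 c rest cur acc hne hb ih =>
      rw [PySem.Chars.splitlines.go.eq_def]
      split
      · simp_all
      · rename_i heq
        injection heq with h1 h2
        exact (hne _ h1 h2).elim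
      · rename_i c' rest' hne' heq
        injection heq with h1 h2
        subst h1; subst h2
        rw [if_neg hb]
        refine ih ?_ hacc
        intro d hd
        rcases List.mem_cons.mp hd with rfl | hd'
        · simpa using hb
        · exact hcur d hd'

lemma pv_splitlines_no_break (s : List Char) :
    ∀ l ∈ PySem.Chars.splitlines s, ∀ c ∈ l, pvIsB c = false := by
  rw [pv_splitlines_eq]
  exact pv_go_no_break s [] [] (by simp) (by simp)

lemma pv_strip_indent (n : Nat) (l : List Char) :
    PySem.Chars.strip (List.replicate n ' ' ++ l) = PySem.Chars.strip l := by
  unfold PySem.Chars.strip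
  congr 1
  unfold PySem.Chars.lstrip
  induction n with
  | zero => simp
  | succ k ih =>
      rw [List.replicate_succ, List.cons_append, List.dropWhile_cons]
      simpa using ih

lemma pv_join_nil (ps : List (List Char)) : PySem.Chars.join [] ps = ps.flatten := by
  unfold PySem.Chars.join List.intercalate
  induction ps with
  | nil => rfl
  | cons p ps ih =>
      cases ps with
      | nil => simp
      | cons q qs => simp_all [List.intersperse]

-- the fold of modificatorsIndent, with its per-line piece pulled out of the branch
lemma pv_mod_fold (ls : List (List Char)) (tabstop : Int) :
    ls.foldl
      (fun result line =>
        if PySem.Chars.strip line ∈ pvSpecs then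
          result ++ (PySem.List.slice line (some tabstop) none ++ ['\n'])
        else result ++ (line ++ ['\n'])) []
    = (ls.map (fun line =>
        if PySem.Chars.strip line ∈ pvSpecs then
          PySem.List.slice line (some tabstop) none ++ ['\n']
        else line ++ ['\n'])).flatten := by
  rw [show (fun (result : List Char) line =>
        if PySem.Chars.strip line ∈ pvSpecs then
          result ++ (PySem.List.slice line (some tabstop) none ++ ['\n'])
        else result ++ (line ++ ['\n']))
      = fun result line => result ++
          (if PySem.Chars.strip line ∈ pvSpecs then
            PySem.List.slice line (some tabstop) none ++ ['\n'] else line ++ ['\n']) from by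
        funext r l; split <;> rfl]
  rw [PySem.List.foldl_append_eq_flatMap, List.flatMap_def]
  rfl

-- a slice l[t:] that keeps the whole line: t from the left, or -t reaching past the left end
lemma pv_slice_all (l : List Char) (t : Int) (h : (l.length : Int) ≤ -t) :
    PySem.List.slice l (some t) none = l := by
  simp only [PySem.List.slice, PySem.List.clampIdx]
  split_ifs with h1 h2
  · simp
  · have h3 : ((l.length : Int) + t).toNat = 0 := by omega
    simp [h3]
  · have h3 : l.length = 0 := by omega
    have h4 : l = [] := List.eq_nil_of_length_eq_zero h3
    simp [h4]

lemma pv_spec_slice (tabstop : Int) (l : List Char)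
    (h : 0 ≤ tabstop ∨ (l.length : Int) ≤ -tabstop) :
    PySem.List.slice (List.replicate tabstop.toNat ' ' ++ l) (some tabstop) none = l := by
  by_cases ht : 0 ≤ tabstop
  · rw [PySem.List.slice_from _ ht]
    simpa using List.drop_left (List.replicate tabstop.toNat ' ') l
  · have h0 : tabstop.toNat = 0 := Int.toNat_of_nonpos (by omega)
    rw [h0, List.replicate_zero, List.nil_append]
    exact pv_slice_all l tabstop (h.resolve_left ht)

-- per-line agreement of A's indent-then-unindent with B's direct piece
lemma pv_piece_eq (tabstop : Int) (l : List Char)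
    (hl : PySem.Chars.strip l ∈ pvSpecs → 0 ≤ tabstop ∨ (l.length : Int) ≤ -tabstop) :
    pvModLine tabstop (pvIndLine tabstop l) = pvAltPiece (List.replicate tabstop.toNat ' ') l := by
  unfold pvModLine pvIndLine
  by_cases he : l = []
  · subst he
    have h0 : PySem.Chars.strip ([] : List Char) ∉ pvSpecs := by decide
    simp [pvAltPiece, h0]
  · by_cases hs : PySem.Chars.strip l ∈ pvSpecs
    · simp [pvAltPiece, he, pv_strip_indent, hs, pv_spec_slice tabstop l (hl hs)]
    · simp [pvAltPiece, he, pv_strip_indent, hs, List.append_assoc]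

-- A's two passes, flattened to one list of per-line pieces (any tabstop)
lemma pv_mod_make (inside : List Char) (tabstop : Int) :
    pvModificatorsIndent (pvMakeIndent inside tabstop) tabstop
      = ((PySem.Chars.splitlines inside).map
          (fun l => pvModLine tabstop (pvIndLine tabstop l))).flatten := by
  have h1 : pvMakeIndent inside tabstop
      = (((PySem.Chars.splitlines inside).map (pvIndLine tabstop)).map (· ++ ['\n'])).flatten := by
    unfold pvMakeIndent
    rw [PySem.List.foldl_append_eq_flatMap, List.flatMap_def, List.map_map]
    rfl
  have hnb : ∀ m ∈ (PySem.Chars.splitlines inside).map (pvIndLine tabstop),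
      ∀ c ∈ m, pvIsB c = false := by
    intro m hm c hc
    obtain ⟨l, hl, rfl⟩ := List.mem_map.mp hm
    unfold pvIndLine at hc
    by_cases he : l = []
    · simp [he] at hc
    · simp only [he, ne_eq, not_false_eq_true, if_true] at hc
      rcases List.mem_append.mp hc with h | h
      · rw [List.eq_of_mem_replicate h]; decide
      · exact pv_splitlines_no_break inside l hl c h
  have h2 : PySem.Chars.splitlines (pvMakeIndent inside tabstop)
      = (PySem.Chars.splitlines inside).map (pvIndLine tabstop) := by
    rw [h1, pv_splitlines_eq, pv_go_flatten _ hnb]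
    simp
  unfold pvModificatorsIndent
  rw [h2, pv_mod_fold, List.map_map]
  rfl

-- A's whole body equals B's joined pieces outside D_
lemma pv_body_eq (inside : List Char) (tabstop : Int)
    (hco : ∀ l ∈ PySem.Chars.splitlines inside,
      PySem.Chars.strip l ∈ pvSpecs → 0 ≤ tabstop ∨ (l.length : Int) ≤ -tabstop) :
    pvModificatorsIndent (pvMakeIndent inside tabstop) tabstop
      = PySem.Chars.join []
          ((PySem.Chars.splitlines inside).map (pvAltPiece (List.replicate tabstop.toNat ' '))) := by
  rw [pv_mod_make, pv_join_nil]
  congr 1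
  refine List.map_congr_left ?_
  intro l hl
  exact pv_piece_eq tabstop l (hco l hl)

-- length comparison of the per-line pieces for negative tabstop
lemma pv_slice_len (l : List Char) (t : Int) :
    (PySem.List.slice l (some t) none).length = l.length - PySem.List.clampIdx l.length t := by
  simp [PySem.List.slice]

lemma pv_clamp_pos (n : Nat) (t : Int) (h1 : t < 0) (h2 : -t < (n : Int)) :
    0 < PySem.List.clampIdx n t := by
  simp only [PySem.List.clampIdx]
  split_ifs <;> omega

lemma pv_len_le (t : Int) (ht : t < 0) (l : List Char) :
    (pvModLine t (pvIndLine t l)).length ≤ (pvAltPiece (List.replicate t.toNat ' ') l).length := by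
  have h0 : t.toNat = 0 := Int.toNat_of_nonpos (by omega)
  unfold pvModLine pvIndLine pvAltPiece
  by_cases he : l = []
  · subst he
    have hns : PySem.Chars.strip ([] : List Char) ∉ pvSpecs := by decide
    simp [hns]
  · by_cases hs : PySem.Chars.strip l ∈ pvSpecs
    · simp only [he, ne_eq, not_false_eq_true, if_true, h0, List.replicate_zero, List.nil_append,
        hs, if_neg he]
      simp [pv_slice_len]
    · simp [he, h0, hs]

lemma pv_len_lt (t : Int) (ht : t < 0) (l : List Char)
    (hs : PySem.Chars.strip l ∈ pvSpecs) (hlen : -t < (l.length : Int)) :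
    (pvModLine t (pvIndLine t l)).length < (pvAltPiece (List.replicate t.toNat ' ') l).length := by
  have h0 : t.toNat = 0 := Int.toNat_of_nonpos (by omega)
  have he : l ≠ [] := by
    intro h; subst h; simp at hlen; omega
  have hc : 0 < PySem.List.clampIdx l.length t := pv_clamp_pos l.length t ht hlen
  have hcle : PySem.List.clampIdx l.length t ≤ l.length := by
    simp only [PySem.List.clampIdx]; split_ifs <;> omega
  unfold pvModLine pvIndLine pvAltPiece
  simp only [he, ne_eq, not_false_eq_true, if_true, h0, List.replicate_zero, List.nil_append,
    hs]
  simp [pv_slice_len]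
  omega

-- ===== VERDICT (by name: the statement is the Claim_ definition above) =====
theorem cxxClassHandler_spec : Claim_unchanged_cxxClassHandler := by
  intro data inside tabstop typeMap _hdom
  unfold Spec_cxxClassHandler
  intro hnd
  unfold D_cxxClassHandler at hnd
  have hco : ∀ l ∈ PySem.Chars.splitlines inside.toList,
      PySem.Chars.strip l ∈ pvSpecs → 0 ≤ tabstop ∨ (l.length : Int) ≤ -tabstop := by
    intro l hl hs
    by_cases ht : 0 ≤ tabstop
    · exact Or.inl ht
    · refine Or.inr ?_
      by_contra hgt
      exact hnd ⟨by omega, l, hl, by simpa [pvSpecs] using hs, by omega⟩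
  unfold cxxClassHandler cxxClassHandler_alt
  rw [pv_body_eq inside.toList tabstop hco]
  simp only [List.append_assoc]
  rw [show ∀ X : List Char, (" ".toList : List Char) ++ ("{\n".toList ++ X) = " {\n".toList ++ X
    from fun X => rfl]

theorem cxxClassHandler_changed : Claim_changed_cxxClassHandler := by
  unfold Claim_changed_cxxClassHandler; decide

theorem cxxClassHandler_tight : Claim_exact_cxxClassHandler := by
  intro data inside tabstop typeMap _hdom hd
  unfold D_cxxClassHandler at hd
  obtain ⟨ht, l0, hl0, hs0, hlen0⟩ := hd
  intro heq
  unfold cxxClassHandler cxxClassHandler_alt at heq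
  simp only [pv_mod_make, pv_join_nil] at heq
  have hlen := congrArg (fun s => s.toList.length) heq
  simp only [String.toList_ofList, List.length_append, List.length_flatten, List.map_map,
    show (" ".toList).length = 1 from rfl, show ("{\n".toList).length = 2 from rfl,
    show (" {\n".toList).length = 3 from rfl] at hlen
  have hsum :
      ((PySem.Chars.splitlines inside.toList).map
        (List.length ∘ fun l => pvModLine tabstop (pvIndLine tabstop l))).sum
      < ((PySem.Chars.splitlines inside.toList).map
        (List.length ∘ pvAltPiece (List.replicate tabstop.toNat ' '))).sum := by
    refine List.sum_lt_sum _ _ (fun l _ => pv_len_le tabstop ht l)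
      ⟨l0, hl0, pv_len_lt tabstop ht l0 (by simpa [pvSpecs] using hs0) hlen0⟩
  omega
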